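-- pv_equiv track=rewrite | github.com/BrookeYangRui/HNP_PHP | src/php_ast_parser.py | _extract_function_arguments
-- ===== SOURCE A (Python) =====
-- from typing import Dict, List, Set, Any, Optional, Tuple, Union
--
-- def _extract_function_arguments(line: str) -> List[str]:
--     """Extract function arguments from a function call"""
--     # Find the opening parenthesis
--     start = line.find('(')
--     if start == -1:
--         return []
--
--     # Find the matching closing parenthesis
--     paren_count = 0
--     end = start
--     for i, char in enumerate(line[start:], start):
--         if char == '(':
--             paren_count += 1
--         elif char == ')':
--             paren_count -= 1
--             if paren_count == 0:
--                 end = i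
--                 break
--
--     if paren_count != 0:
--         return []
--
--     # Extract arguments
--     args_str = line[start+1:end].strip()
--     if not args_str:
--         return []
--
--     # Simple argument splitting (doesn't handle nested parentheses)
--     args = []
--     current_arg = ""
--     paren_level = 0
--
--     for char in args_str:
--         if char == '(':
--             paren_level += 1
--         elif char == ')':
--             paren_level -= 1
--         elif char == ',' and paren_level == 0:
--             args.append(current_arg.strip())
--             current_arg = ""
--             continue
--
--         current_arg += char
--
--     if current_arg.strip():
--         args.append(current_arg.strip())
--
--     return args
-- ===== SOURCE B (Python) =====
-- def _extract_function_arguments(line):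
--     """Extract function arguments from a function call (single pass)."""
--     start = line.find('(')
--     if start == -1:
--         return []
--     args = []
--     current = ""
--     depth = 0
--     closed = False
--     for ch in line[start:]:
--         if ch == '(':
--             depth += 1
--             if depth == 1:
--                 continue
--         elif ch == ')':
--             depth -= 1
--             if depth == 0:
--                 closed = True
--                 break
--         elif ch == ',' and depth == 1:
--             args.append(current.strip())
--             current = ""
--             continue
--         current += ch
--     if not closed:
--         return []
--     if current.strip():
--         args.append(current.strip())
--     return args
-- ===== Notes on version B (the rewrite author's own statement) =====
-- stated objective: alternative
-- what changed: Replaces A's two-phase scheme (a counting scan to locate the matching close parenthesis, then slicing out and stripping the inner substring, then a second scan of it to split on top-level commas) with a single forward scan from the first open parenthesis that maintains one depth counter and emits stripped arguments on the fly.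
import Mathlib
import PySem

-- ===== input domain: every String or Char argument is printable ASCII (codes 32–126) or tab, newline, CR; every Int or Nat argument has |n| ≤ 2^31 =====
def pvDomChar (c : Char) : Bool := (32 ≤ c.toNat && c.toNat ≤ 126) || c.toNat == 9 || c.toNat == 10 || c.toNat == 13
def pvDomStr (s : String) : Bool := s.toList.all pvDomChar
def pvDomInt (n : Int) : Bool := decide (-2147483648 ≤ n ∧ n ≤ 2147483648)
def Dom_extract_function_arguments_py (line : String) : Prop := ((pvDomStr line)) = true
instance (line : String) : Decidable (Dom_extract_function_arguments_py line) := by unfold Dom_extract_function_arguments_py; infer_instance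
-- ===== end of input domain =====

-- B replaces A's two-phase scheme (find the matching ')', slice and strip the inner
-- substring, re-scan it to split on top-level commas) by a single forward scan that
-- splits arguments on the fly; objective: alternative (same O(n) cost, one pass).

-- ===== PORT A =====
-- the 'for i, char in enumerate(line[start:], start)' loop: returns (end, paren_count)
def aFindClose : List Char → Int → Int → Int → Int × Int
  | [], _, cnt, endv => (endv, cnt)
  | c :: cs, i, cnt, endv =>
    if c = '(' then aFindClose cs (i + 1) (cnt + 1) endv
    else if c = ')' then
      (if cnt - 1 = 0 then (i, 0) else aFindClose cs (i + 1) (cnt - 1) endv)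
    else aFindClose cs (i + 1) cnt endv

-- the splitting loop over args_str, plus the trailing 'if current_arg.strip(): args.append(...)'
def aSplit : List Char → List String → List Char → Int → List String
  | [], args, cur, _ =>
      if PySem.Chars.strip cur ≠ [] then args ++ [String.ofList (PySem.Chars.strip cur)] else args
  | c :: cs, args, cur, lvl =>
    if c = '(' then aSplit cs args (cur ++ [c]) (lvl + 1)
    else if c = ')' then aSplit cs args (cur ++ [c]) (lvl - 1)
    else if c = ',' ∧ lvl = 0 then aSplit cs (args ++ [String.ofList (PySem.Chars.strip cur)]) [] lvl
    else aSplit cs args (cur ++ [c]) lvl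

def extract_function_arguments_py (line : String) : List String :=
  let σ := line.toList
  let start := PySem.Str.find line "("          -- line.find('(')
  if start = -1 then []
  else
    -- line[start:] with 0 ≤ start is exactly drop start.toNat
    let r := aFindClose (σ.drop start.toNat) start 0 start
    if r.2 ≠ 0 then []
    else
      -- line[start+1:end] with 0 ≤ start+1 ≤ end is exactly (take end.toNat).drop (start.toNat+1)
      let args_str := PySem.Chars.strip ((σ.take r.1.toNat).drop (start.toNat + 1))
      if args_str = [] then []
      else aSplit args_str [] [] 0

-- ===== PORT B =====
-- single scan from the first '(': none = never closed, some (args, current) at the matching ')'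
def bScan : List Char → List String → List Char → Int → Option (List String × List Char)
  | [], _, _, _ => none
  | c :: cs, args, cur, depth =>
    if c = '(' then
      (if depth + 1 = 1 then bScan cs args cur (depth + 1)
       else bScan cs args (cur ++ [c]) (depth + 1))
    else if c = ')' then
      (if depth - 1 = 0 then some (args, cur) else bScan cs args (cur ++ [c]) (depth - 1))
    else if c = ',' ∧ depth = 1 then bScan cs (args ++ [String.ofList (PySem.Chars.strip cur)]) [] depth
    else bScan cs args (cur ++ [c]) depth

def extract_function_arguments_py_alt (line : String) : List String :=
  let start := PySem.Str.find line "("          -- line.find('(')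
  if start = -1 then []
  else
    match bScan (line.toList.drop start.toNat) [] [] 0 with
    | none => []
    | some (args, cur) =>
        if PySem.Chars.strip cur ≠ [] then args ++ [String.ofList (PySem.Chars.strip cur)] else args

-- ===== PRECONDITION & SPEC =====
def Spec_extract_function_arguments_py (line : String) (out : List String) : Prop := out = extract_function_arguments_py_alt line
instance (line : String) (out : List String) : Decidable (Spec_extract_function_arguments_py line out) := by unfold Spec_extract_function_arguments_py; infer_instance

-- ===== CLAIM (what is proved, stated in full; the proofs are below) =====
def Claim_equal_extract_function_arguments_py : Prop := ∀ (line : String), Dom_extract_function_arguments_py line → Spec_extract_function_arguments_py line (extract_function_arguments_py line)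

-- ===== LEMMAS AND PROOFS =====

-- reference scanner: consumes chars until the counter (≥ 1) hits 0 at a ')';
-- some (inner, rest) means t = inner ++ ')' :: rest with the matching close found
def pvScan : Int → List Char → Option (List Char × List Char)
  | _, [] => none
  | cnt, c :: cs =>
    if c = ')' ∧ cnt = 1 then some ([], cs)
    else
      (pvScan (if c = '(' then cnt + 1 else if c = ')' then cnt - 1 else cnt) cs).map
        (fun p => (c :: p.1, p.2))

-- the comma-splitting state machine without the trailing flush
def pvSplitCore : List Char → List String → List Char → Int → List String × List Char
  | [], args, cur, _ => (args, cur)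
  | c :: cs, args, cur, lvl =>
    if c = '(' then pvSplitCore cs args (cur ++ [c]) (lvl + 1)
    else if c = ')' then pvSplitCore cs args (cur ++ [c]) (lvl - 1)
    else if c = ',' ∧ lvl = 0 then pvSplitCore cs (args ++ [String.ofList (PySem.Chars.strip cur)]) [] lvl
    else pvSplitCore cs args (cur ++ [c]) lvl

def pvFin (p : List String × List Char) : List String :=
  if PySem.Chars.strip p.2 ≠ [] then p.1 ++ [String.ofList (PySem.Chars.strip p.2)] else p.1

lemma pvScan_decomp (cnt : Int) (t a b : List Char) (h : pvScan cnt t = some (a, b)) :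
    t = a ++ ')' :: b := by
  induction t generalizing cnt a b with
  | nil => simp [pvScan] at h
  | cons c cs ih =>
    simp only [pvScan] at h
    split at h
    · rename_i hc
      obtain ⟨rfl, rfl⟩ := Prod.mk.injEq .. ▸ Option.some.inj h
      simpa using hc.1
    · rcases ho : pvScan (if c = '(' then cnt + 1 else if c = ')' then cnt - 1 else cnt) cs with _ | p
      · simp [ho] at h
      · simp only [ho, Option.map_some] at h
        obtain ⟨h1, rfl⟩ := Prod.mk.injEq .. ▸ Option.some.inj h
        subst h1
        simp [ih _ _ _ ho]

lemma aFindClose_some (t : List Char) (a b : List Char) :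
    ∀ (cnt i e : Int), pvScan cnt t = some (a, b) →
      aFindClose t i cnt e = (i + a.length, 0) := by
  induction t generalizing a b with
  | nil => intro cnt i e h; simp [pvScan] at h
  | cons c cs ih =>
    intro cnt i e h
    simp only [pvScan] at h
    split at h
    · rename_i hc
      obtain ⟨rfl, rfl⟩ := Prod.mk.injEq .. ▸ Option.some.inj h
      have : ¬ c = '(' := by rw [hc.1]; decide
      simp [aFindClose, this, hc.1, hc.2]
    · rename_i hc
      rcases ho : pvScan (if c = '(' then cnt + 1 else if c = ')' then cnt - 1 else cnt) cs with _ | p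
      · simp [ho] at h
      · simp only [ho, Option.map_some] at h
        obtain ⟨h1, rfl⟩ := Prod.mk.injEq .. ▸ Option.some.inj h
        subst h1
        by_cases h1 : c = '('
        · rw [if_pos h1] at ho
          simp [aFindClose, h1, ih _ _ _ _ _ ho, List.length_cons]; push_cast; ring
        · by_cases h2 : c = ')'
          · have hcnt : ¬ cnt = 1 := fun hh => hc ⟨h2, hh⟩
            rw [if_neg h1, if_pos h2] at ho
            have hne : ¬ cnt - 1 = 0 := by omega
            simp [aFindClose, h1, h2, hne, ih _ _ _ _ _ ho, List.length_cons]; push_cast; ring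
          · rw [if_neg h1, if_neg h2] at ho
            simp [aFindClose, h1, h2, ih _ _ _ _ _ ho, List.length_cons]; push_cast; ring

lemma aFindClose_none (t : List Char) :
    ∀ (cnt i e : Int), 1 ≤ cnt → pvScan cnt t = none → 1 ≤ (aFindClose t i cnt e).2 := by
  induction t with
  | nil => intro cnt i e h1 _; simpa [aFindClose] using h1
  | cons c cs ih =>
    intro cnt i e h1 h
    simp only [pvScan] at h
    split at h
    · simp at h
    · rename_i hc
      rcases ho : pvScan (if c = '(' then cnt + 1 else if c = ')' then cnt - 1 else cnt) cs with _ | p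
      · by_cases h2 : c = '('
        · rw [if_pos h2] at ho
          simpa [aFindClose, h2] using ih (cnt + 1) (i + 1) e (by omega) ho
        · by_cases h3 : c = ')'
          · have hcnt : ¬ cnt = 1 := fun hh => hc ⟨h3, hh⟩
            rw [if_neg h2, if_pos h3] at ho
            have hne : ¬ cnt - 1 = 0 := by omega
            simpa [aFindClose, h2, h3, hne] using ih (cnt - 1) (i + 1) e (by omega) ho
          · rw [if_neg h2, if_neg h3] at ho
            simpa [aFindClose, h2, h3] using ih cnt (i + 1) e h1 ho
      · simp [ho] at h

lemma bScan_none (t : List Char) :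
    ∀ (args : List String) (cur : List Char) (d : Int), 1 ≤ d → pvScan d t = none →
      bScan t args cur d = none := by
  induction t with
  | nil => intro args cur d _ _; simp [bScan]
  | cons c cs ih =>
    intro args cur d hd h
    simp only [pvScan] at h
    split at h
    · simp at h
    · rename_i hc
      rcases ho : pvScan (if c = '(' then d + 1 else if c = ')' then d - 1 else d) cs with _ | p
      · by_cases h2 : c = '('
        · rw [if_pos h2] at ho
          have hne : ¬ d + 1 = 1 := by omega
          simpa [bScan, h2, hne] using ih args (cur ++ [c]) (d + 1) (by omega) ho
        · by_cases h3 : c = ')'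
          · have hd1 : ¬ d = 1 := fun hh => hc ⟨h3, hh⟩
            rw [if_neg h2, if_pos h3] at ho
            have hne : ¬ d - 1 = 0 := by omega
            simpa [bScan, h2, h3, hne] using ih args (cur ++ [c]) (d - 1) (by omega) ho
          · rw [if_neg h2, if_neg h3] at ho
            by_cases h4 : c = ',' ∧ d = 1
            · simpa [bScan, h2, h3, h4] using ih (args ++ [String.ofList (PySem.Chars.strip cur)]) [] d hd ho
            · simpa [bScan, h2, h3, h4] using ih args (cur ++ [c]) d hd ho
      · simp [ho] at h

lemma bScan_some (t a b : List Char) :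
    ∀ (args : List String) (cur : List Char) (d : Int), 1 ≤ d → pvScan d t = some (a, b) →
      bScan t args cur d = some (pvSplitCore a args cur (d - 1)) := by
  induction t generalizing a b with
  | nil => intro args cur d _ h; simp [pvScan] at h
  | cons c cs ih =>
    intro args cur d hd h
    simp only [pvScan] at h
    split at h
    · rename_i hc
      obtain ⟨rfl, rfl⟩ := Prod.mk.injEq .. ▸ Option.some.inj h
      have hne : ¬ c = '(' := by rw [hc.1]; decide
      simp [bScan, hne, hc.1, hc.2, pvSplitCore]
    · rename_i hc
      rcases ho : pvScan (if c = '(' then d + 1 else if c = ')' then d - 1 else d) cs with _ | p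
      · simp [ho] at h
      · simp only [ho, Option.map_some] at h
        obtain ⟨h1, rfl⟩ := Prod.mk.injEq .. ▸ Option.some.inj h
        subst h1
        by_cases h2 : c = '('
        · rw [if_pos h2] at ho
          have hne : ¬ d + 1 = 1 := by omega
          have := ih _ _ args (cur ++ [c]) (d + 1) (by omega) ho
          rw [show d + 1 - 1 = d from by ring] at this
          subst h2
          simpa [bScan, hne, pvSplitCore] using this
        · by_cases h3 : c = ')'
          · have hd1 : ¬ d = 1 := fun hh => hc ⟨h3, hh⟩
            rw [if_neg h2, if_pos h3] at ho
            have hne : ¬ d - 1 = 0 := by omega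
            have := ih _ _ args (cur ++ [c]) (d - 1) (by omega) ho
            subst h3
            simpa [bScan, hne, pvSplitCore] using this
          · rw [if_neg h2, if_neg h3] at ho
            by_cases h4 : c = ',' ∧ d = 1
            · obtain ⟨hc4, hd4⟩ := h4
              subst hc4; subst hd4
              have := ih _ _ (args ++ [String.ofList (PySem.Chars.strip cur)]) [] 1 le_rfl ho
              simpa [bScan, h2, h3, pvSplitCore] using this
            · have := ih _ _ args (cur ++ [c]) d hd ho
              have h5 : ¬ (c = ',' ∧ d - 1 = 0) := by
                rintro ⟨hh1, hh2⟩; exact h4 ⟨hh1, by omega⟩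
              simp [bScan, h2, h3, h4, this, pvSplitCore, h5]

lemma aSplit_eq_fin (cs : List Char) :
    ∀ (args : List String) (cur : List Char) (lvl : Int),
      aSplit cs args cur lvl = pvFin (pvSplitCore cs args cur lvl) := by
  induction cs with
  | nil => intro args cur lvl; simp [aSplit, pvSplitCore, pvFin]
  | cons c cs ih =>
    intro args cur lvl
    by_cases h2 : c = '('
    · simp [aSplit, pvSplitCore, h2, ih]
    · by_cases h3 : c = ')'
      · simp [aSplit, pvSplitCore, h2, h3, ih]
      · by_cases h4 : c = ',' ∧ lvl = 0
        · simp [aSplit, pvSplitCore, h2, h3, h4, ih]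
        · simp [aSplit, pvSplitCore, h2, h3, h4, ih]


lemma pvWS_ne (c : Char) (h : PySem.Chars.isspace c = true) :
    ¬ c = '(' ∧ ¬ c = ')' ∧ ¬ c = ',' := by
  refine ⟨?_, ?_, ?_⟩ <;> rintro rfl <;> revert h <;> decide

lemma pvStrip_ws_append (w cs : List Char) (hw : ∀ c ∈ w, PySem.Chars.isspace c = true) :
    PySem.Chars.strip (w ++ cs) = PySem.Chars.strip cs := by
  simp [PySem.Chars.strip, PySem.Chars.lstrip, List.dropWhile_append,
    List.dropWhile_eq_nil_iff.mpr hw]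

lemma pvRstrip_append_ws (cs w : List Char) (hw : ∀ c ∈ w, PySem.Chars.isspace c = true) :
    PySem.Chars.rstrip (cs ++ w) = PySem.Chars.rstrip cs := by
  have : ∀ c ∈ w.reverse, PySem.Chars.isspace c = true := fun c hc => hw c (List.mem_reverse.mp hc)
  simp [PySem.Chars.rstrip, List.reverse_append, List.dropWhile_append,
    List.dropWhile_eq_nil_iff.mpr this]

lemma pvStrip_append_ws (cs w : List Char) (hw : ∀ c ∈ w, PySem.Chars.isspace c = true) :
    PySem.Chars.strip (cs ++ w) = PySem.Chars.strip cs := by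
  by_cases hnil : PySem.Chars.lstrip cs = []
  · have hcs : ∀ c ∈ cs, PySem.Chars.isspace c = true := by
      simpa [PySem.Chars.lstrip, List.dropWhile_eq_nil_iff] using hnil
    have hall : ∀ c ∈ cs ++ w, PySem.Chars.isspace c = true := by
      intro c hc; rcases List.mem_append.mp hc with h | h
      · exact hcs c h
      · exact hw c h
    have h1 : PySem.Chars.lstrip (cs ++ w) = [] := by
      unfold PySem.Chars.lstrip; exact List.dropWhile_eq_nil_iff.mpr hall
    simp [PySem.Chars.strip, h1, hnil]
  · have h1 : PySem.Chars.lstrip (cs ++ w) = PySem.Chars.lstrip cs ++ w := by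
      have : (List.dropWhile PySem.Chars.isspace cs).isEmpty = false := by
        simpa [List.isEmpty_iff, PySem.Chars.lstrip] using hnil
      simp [PySem.Chars.lstrip, List.dropWhile_append, this]
    rw [PySem.Chars.strip, PySem.Chars.strip, h1, pvRstrip_append_ws _ _ hw]

lemma pvStrip_decomp (cs : List Char) :
    ∃ w1 w2, cs = w1 ++ PySem.Chars.strip cs ++ w2 ∧
      (∀ c ∈ w1, PySem.Chars.isspace c = true) ∧ (∀ c ∈ w2, PySem.Chars.isspace c = true) := by
  refine ⟨List.takeWhile PySem.Chars.isspace cs,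
    (List.takeWhile PySem.Chars.isspace (PySem.Chars.lstrip cs).reverse).reverse, ?_, ?_, ?_⟩
  · have h1 : cs = List.takeWhile PySem.Chars.isspace cs ++ PySem.Chars.lstrip cs :=
      (List.takeWhile_append_dropWhile).symm
    have h2 : PySem.Chars.lstrip cs =
        PySem.Chars.strip cs ++ (List.takeWhile PySem.Chars.isspace (PySem.Chars.lstrip cs).reverse).reverse := by
      have h3 : List.takeWhile PySem.Chars.isspace (PySem.Chars.lstrip cs).reverse ++
            List.dropWhile PySem.Chars.isspace (PySem.Chars.lstrip cs).reverse =
          (PySem.Chars.lstrip cs).reverse :=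
        List.takeWhile_append_dropWhile
      conv_lhs => rw [← List.reverse_reverse (PySem.Chars.lstrip cs), ← h3]
      rw [List.reverse_append]
      rfl
    rw [List.append_assoc, ← h2]; exact h1
  · exact fun c hc => List.mem_takeWhile_imp hc
  · exact fun c hc => List.mem_takeWhile_imp (List.mem_reverse.mp hc)

lemma pvCore_ws_prefix (w : List Char) :
    ∀ (cs : List Char) (args : List String) (cur : List Char) (lvl : Int),
      (∀ c ∈ w, PySem.Chars.isspace c = true) →
      pvSplitCore (w ++ cs) args cur lvl = pvSplitCore cs args (cur ++ w) lvl := by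
  induction w with
  | nil => intro cs args cur lvl _; simp
  | cons c w ih =>
    intro cs args cur lvl hw
    obtain ⟨h1, h2, h3⟩ := pvWS_ne c (hw c (List.mem_cons_self))
    have h4 : ¬ (c = ',' ∧ lvl = 0) := fun hh => h3 hh.1
    have := ih cs args (cur ++ [c]) lvl (fun d hd => hw d (List.mem_cons_of_mem _ hd))
    simpa [pvSplitCore, h1, h2, h4, List.append_assoc] using this

lemma pvCore_all_ws (w : List Char) :
    ∀ (args : List String) (cur : List Char) (lvl : Int),
      (∀ c ∈ w, PySem.Chars.isspace c = true) →
      pvSplitCore w args cur lvl = (args, cur ++ w) := by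
  induction w with
  | nil => intro args cur lvl _; simp [pvSplitCore]
  | cons c w ih =>
    intro args cur lvl hw
    obtain ⟨h1, h2, h3⟩ := pvWS_ne c (hw c (List.mem_cons_self))
    have h4 : ¬ (c = ',' ∧ lvl = 0) := fun hh => h3 hh.1
    have := ih args (cur ++ [c]) lvl (fun d hd => hw d (List.mem_cons_of_mem _ hd))
    simpa [pvSplitCore, h1, h2, h4, List.append_assoc] using this

lemma pvCore_ws_suffix (cs : List Char) :
    ∀ (args : List String) (cur : List Char) (lvl : Int) (w : List Char),
      (∀ c ∈ w, PySem.Chars.isspace c = true) →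
      pvSplitCore (cs ++ w) args cur lvl =
        ((pvSplitCore cs args cur lvl).1, (pvSplitCore cs args cur lvl).2 ++ w) := by
  induction cs with
  | nil => intro args cur lvl w hw; simpa [pvSplitCore] using pvCore_all_ws w args cur lvl hw
  | cons c cs ih =>
    intro args cur lvl w hw
    by_cases h2 : c = '('
    · simp [pvSplitCore, h2, ih _ _ _ _ hw]
    · by_cases h3 : c = ')'
      · simp [pvSplitCore, h2, h3, ih _ _ _ _ hw]
      · by_cases h4 : c = ',' ∧ lvl = 0
        · simp [pvSplitCore, h2, h3, h4, ih _ _ _ _ hw]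
        · simp [pvSplitCore, h2, h3, h4, ih _ _ _ _ hw]

lemma pvCore_ws_cur (cs : List Char) :
    ∀ (args : List String) (cur w : List Char) (lvl : Int),
      (∀ c ∈ w, PySem.Chars.isspace c = true) →
      (pvSplitCore cs args (w ++ cur) lvl).1 = (pvSplitCore cs args cur lvl).1 ∧
        PySem.Chars.strip (pvSplitCore cs args (w ++ cur) lvl).2 =
          PySem.Chars.strip (pvSplitCore cs args cur lvl).2 := by
  induction cs with
  | nil => intro args cur w lvl hw; exact ⟨rfl, pvStrip_ws_append w cur hw⟩
  | cons c cs ih =>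
    intro args cur w lvl hw
    by_cases h2 : c = '('
    · simpa [pvSplitCore, h2, List.append_assoc] using ih args (cur ++ [c]) w (lvl + 1) hw
    · by_cases h3 : c = ')'
      · simpa [pvSplitCore, h2, h3, List.append_assoc] using ih args (cur ++ [c]) w (lvl - 1) hw
      · by_cases h4 : c = ',' ∧ lvl = 0
        · simp [pvSplitCore, h2, h3, h4, pvStrip_ws_append w cur hw]
        · simpa [pvSplitCore, h2, h3, h4, List.append_assoc] using ih args (cur ++ [c]) w lvl hw

lemma pvFin_congr (p q : List String × List Char) (h1 : p.1 = q.1)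
    (h2 : PySem.Chars.strip p.2 = PySem.Chars.strip q.2) : pvFin p = pvFin q := by
  simp [pvFin, h1, h2]

lemma pvFin_core (a : List Char) :
    pvFin (pvSplitCore a [] [] 0) =
      if PySem.Chars.strip a = [] then [] else aSplit (PySem.Chars.strip a) [] [] 0 := by
  obtain ⟨w1, w2, hdec, hw1, hw2⟩ := pvStrip_decomp a
  have step1 : pvSplitCore a [] [] 0 = pvSplitCore (PySem.Chars.strip a ++ w2) [] w1 0 := by
    conv_lhs => rw [hdec, List.append_assoc]
    simpa using pvCore_ws_prefix w1 (PySem.Chars.strip a ++ w2) [] [] 0 hw1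
  have step2 := pvCore_ws_suffix (PySem.Chars.strip a) [] w1 0 w2 hw2
  have step3 := pvCore_ws_cur (PySem.Chars.strip a) [] [] w1 0 hw1
  rw [List.append_nil] at step3
  have key : pvFin (pvSplitCore a [] [] 0) = pvFin (pvSplitCore (PySem.Chars.strip a) [] [] 0) := by
    rw [step1, step2]
    have e1 : pvFin ((pvSplitCore (PySem.Chars.strip a) [] w1 0).1,
        (pvSplitCore (PySem.Chars.strip a) [] w1 0).2 ++ w2) =
        pvFin (pvSplitCore (PySem.Chars.strip a) [] w1 0) :=
      pvFin_congr ((pvSplitCore (PySem.Chars.strip a) [] w1 0).1,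
          (pvSplitCore (PySem.Chars.strip a) [] w1 0).2 ++ w2)
        (pvSplitCore (PySem.Chars.strip a) [] w1 0) rfl
        (pvStrip_append_ws (pvSplitCore (PySem.Chars.strip a) [] w1 0).2 w2 hw2)
    rw [e1]
    exact pvFin_congr _ _ step3.1 step3.2
  rw [key]
  by_cases hnil : PySem.Chars.strip a = []
  · rw [hnil]
    simp [pvSplitCore, pvFin, PySem.Chars.strip, PySem.Chars.lstrip, PySem.Chars.rstrip]
  · rw [if_neg hnil, aSplit_eq_fin]

theorem extract_function_arguments_py_spec : Claim_equal_extract_function_arguments_py := by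
  intro line _
  unfold Spec_extract_function_arguments_py extract_function_arguments_py extract_function_arguments_py_alt
  have hfe : PySem.Str.find line "(" = PySem.Chars.find line.toList ['('] := by
    rw [PySem.Str.find_eq]; rfl
  rw [hfe]
  set F := PySem.Chars.find line.toList ['('] with hF
  by_cases hs : F = -1
  · rw [if_pos hs, if_pos hs]
  · rw [if_neg hs, if_neg hs]
    have h0 : 0 ≤ F := by
      have := PySem.Chars.neg_one_le_find line.toList ['(']
      omega
    have hfind : (['('] : List Char) <+: line.toList.drop F.toNat :=
      (PySem.Chars.find_spec (s := line.toList) (sub := ['(']) h0).1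
    obtain ⟨u, hu⟩ := hfind
    have hu' : line.toList.drop F.toNat = '(' :: u := by
      simpa using hu.symm
    have hlen : F.toNat ≤ line.toList.length := by
      by_contra hcon
      have hnil : line.toList.drop F.toNat = [] :=
        List.drop_eq_nil_iff.mpr (by omega)
      rw [hnil] at hu'
      simp at hu'
    have hA1 : aFindClose (line.toList.drop F.toNat) F 0 F = aFindClose u (F + 1) 1 F := by
      rw [hu']
      norm_num [aFindClose]
    have hB1 : bScan (line.toList.drop F.toNat) [] [] 0 = bScan u [] [] 1 := by
      rw [hu']
      norm_num [bScan]
    rcases hscan : pvScan 1 u with _ | ab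
    · -- the '(' is never closed: A's counter stays positive, B's scan returns none
      have hA2 := aFindClose_none u 1 (F + 1) F le_rfl hscan
      have hB2 := bScan_none u [] [] 1 le_rfl hscan
      rw [hA1, hB1, hB2]
      have hne : (aFindClose u (F + 1) 1 F).2 ≠ 0 := by omega
      dsimp only
      rw [if_pos hne]
    · obtain ⟨a, b⟩ := ab
      have hdec : u = a ++ ')' :: b := pvScan_decomp 1 u a b hscan
      have hA2 := aFindClose_some u a b 1 (F + 1) F hscan
      have hB2 := bScan_some u a b [] [] 1 le_rfl hscan
      have hslice : (line.toList.take ((F + 1 + (a.length : Int)).toNat)).drop (F.toNat + 1) = a := by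
        have hnn : (F + 1 + (a.length : Int)).toNat = F.toNat + 1 + a.length := by omega
        rw [hnn]
        have hσ : line.toList = line.toList.take F.toNat ++ ('(' :: (a ++ ')' :: b)) := by
          conv_lhs => rw [← List.take_append_drop F.toNat line.toList]
          rw [hu', hdec]
        have hPlen : (line.toList.take F.toNat).length = F.toNat := by
          rw [List.length_take]; omega
        conv_lhs => rw [hσ]
        rw [List.take_append, List.take_of_length_le (by omega)]
        rw [hPlen]
        have h1k : F.toNat + 1 + a.length - F.toNat = a.length + 1 := by omega
        rw [h1k, List.take_succ_cons]
        have hta : (a ++ ')' :: b).take a.length = a := by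
          rw [List.take_append, List.take_of_length_le le_rfl, Nat.sub_self]
          simp
        rw [hta, List.drop_append, List.drop_of_length_le (by omega)]
        rw [hPlen]
        have hd1 : F.toNat + 1 - F.toNat = 1 := by omega
        rw [hd1]
        simp
      rw [hA1, hA2, hB1, hB2]
      dsimp only
      rw [if_neg (show ¬ ((0 : Int) ≠ 0) by simp)]
      rw [hslice]
      rw [show (1 : Int) - 1 = 0 from rfl]
      rw [← pvFin_core]
      rfl
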